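-- pv_equiv track=rewrite | github.com/banemb/Exopython | python_beginner/src/beginner/Exo11NombreCroissant.py | tab_Classe
-- ===== SOURCE A (Python) =====
-- def tab_Classe(tab):
--     b=0
--     for j in range(0,len(tab)-1):
--         a = j+1
--         if (tab[j]>tab[a]):
--             b = tab[a]
--             tab[a]=tab[j]
--             tab[j]=b
--
--     return tab
-- ===== SOURCE B (Python) =====
-- def tab_Classe(tab):
--     # One-pass carry fold: build the output while carrying the running
--     # element forward; no index arithmetic, no in-place swaps.
--     # Note: A mutates tab in place; B returns a fresh list (return value equal).
--     if not tab:
--         return []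
--     cur = tab[0]
--     out = []
--     for x in tab[1:]:
--         if cur > x:
--             out.append(x)
--         else:
--             out.append(cur)
--             cur = x
--     out.append(cur)
--     return out
-- ===== Notes on version B (the rewrite author's own statement) =====
-- stated objective: alternative
-- what changed: A does a single bubble pass by index, swapping adjacent out-of-order pairs in place; B is a one-pass carry fold that builds a fresh output list while carrying the running element forward (no index arithmetic, no swaps); A mutates its argument, B does not, the return values are identical.
import Mathlib
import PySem

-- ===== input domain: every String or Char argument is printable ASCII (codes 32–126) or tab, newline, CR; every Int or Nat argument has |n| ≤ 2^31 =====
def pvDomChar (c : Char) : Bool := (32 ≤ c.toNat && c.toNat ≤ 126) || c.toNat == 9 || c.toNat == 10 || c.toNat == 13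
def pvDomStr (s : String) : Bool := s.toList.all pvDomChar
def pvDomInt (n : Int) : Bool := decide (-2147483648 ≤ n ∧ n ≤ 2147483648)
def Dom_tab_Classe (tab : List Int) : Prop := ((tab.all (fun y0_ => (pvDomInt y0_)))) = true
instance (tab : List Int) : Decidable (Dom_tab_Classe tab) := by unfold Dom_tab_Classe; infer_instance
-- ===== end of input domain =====

-- B replaces A's indexed in-place adjacent-swap pass by a one-pass carry fold that
-- builds a fresh list (A mutates its argument; the equivalence proved is about the
-- return value, which is identical).


-- ===== PORT A =====
-- A's loop body: b = tab[a]; tab[a] = tab[j]; tab[j] = b   (guarded by tab[j] > tab[a])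
def aSwapStep (t : List Int) (j : Int) : List Int :=
  let a := j + 1
  if PySem.List.pyGetD t j 0 > PySem.List.pyGetD t a 0 then
    let b := PySem.List.pyGetD t a 0
    let t1 := PySem.List.pySetD t a (PySem.List.pyGetD t j 0)
    PySem.List.pySetD t1 j b
  else t

def tab_Classe (tab : List Int) : List Int :=
  (PySem.List.pyRange 0 ((tab.length : Int) - 1) 1).foldl aSwapStep tab

-- ===== PORT B =====
def tab_Classe_alt (tab : List Int) : List Int :=
  match tab with
  | [] => []
  | c0 :: rest =>
    let s := rest.foldl
      (fun (s : List Int × Int) x =>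
        if s.2 > x then (s.1 ++ [x], s.2) else (s.1 ++ [s.2], x))
      ([], c0)
    s.1 ++ [s.2]

-- ===== PRECONDITION & SPEC =====
def Spec_tab_Classe (tab : List Int) (out : List Int) : Prop := out = tab_Classe_alt tab
instance (tab : List Int) (out : List Int) : Decidable (Spec_tab_Classe tab out) := by unfold Spec_tab_Classe; infer_instance

-- ===== CLAIM (what is proved, stated in full; the proofs are below) =====
def Claim_equal_tab_Classe : Prop := ∀ (tab : List Int), Dom_tab_Classe tab → Spec_tab_Classe tab (tab_Classe tab)

-- ===== LEMMAS AND PROOFS =====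

-- Recursive characterisation of a single bubble pass with carry `cur`.
def bubble (cur : Int) : List Int → List Int
  | [] => [cur]
  | x :: xs => if cur > x then x :: bubble cur xs else cur :: bubble x xs

-- B's fold accumulates `bubble`.
theorem alt_fold_eq (xs : List Int) : ∀ (out : List Int) (cur : Int),
    (let s := xs.foldl
      (fun (s : List Int × Int) x =>
        if s.2 > x then (s.1 ++ [x], s.2) else (s.1 ++ [s.2], x)) (out, cur)
     s.1 ++ [s.2]) = out ++ bubble cur xs := by
  induction xs with
  | nil => intro out cur; simp [bubble]
  | cons x xs ih =>
    intro out cur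
    simp only [List.foldl_cons, bubble]
    by_cases h : cur > x
    · simp only [h, if_pos, ih]
      simp
    · simp only [h, ih, if_false]
      simp

theorem alt_eq_bubble (c : Int) (xs : List Int) :
    tab_Classe_alt (c :: xs) = bubble c xs := by
  simpa using alt_fold_eq xs [] c

-- A's step at an index ≥ 1 leaves the head alone and acts on the tail.
theorem aSwapStep_shift (h : Int) (t : List Int) (k : Nat) :
    aSwapStep (h :: t) ((k : Int) + 1) = h :: aSwapStep t (k : Int) := by
  have e1 : (k : Int) + 1 = ((k + 1 : Nat) : Int) := by push_cast; ring
  have e2 : (k : Int) + 1 + 1 = ((k + 2 : Nat) : Int) := by push_cast; ring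
  simp only [aSwapStep]
  rw [e2, e1]
  simp only [PySem.List.pyGetD_natCast, PySem.List.pySetD_natCast]
  simp [List.getD]
  split_ifs <;> rfl

-- Folding A's step over indices a..b (a ≥ 1) on h :: t shifts to the tail.
theorem fold_shift (h : Int) : ∀ (n : Nat) (a b : Int) (t : List Int), 1 ≤ a → b - a ≤ (n : Int) →
    (PySem.List.pyRange a b 1).foldl aSwapStep (h :: t) =
      h :: (PySem.List.pyRange (a - 1) (b - 1) 1).foldl aSwapStep t := by
  intro n
  induction n with
  | zero =>
    intro a b t ha hb
    rw [PySem.List.pyRange_one_eq_nil (by omega), PySem.List.pyRange_one_eq_nil (by omega)]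
    rfl
  | succ n ih =>
    intro a b t ha hb
    by_cases hab : b ≤ a
    · rw [PySem.List.pyRange_one_eq_nil (by omega), PySem.List.pyRange_one_eq_nil (by omega)]
      rfl
    · rw [PySem.List.pyRange_one_cons (by omega), PySem.List.pyRange_one_cons (show a - 1 < b - 1 by omega)]
      simp only [List.foldl_cons]
      obtain ⟨k, rfl⟩ : ∃ k : Nat, a = (k : Int) + 1 := ⟨(a - 1).toNat, by omega⟩
      have e3 : (k : Int) + 1 - 1 = (k : Int) := by ring
      rw [e3, aSwapStep_shift h t k]
      have := ih ((k : Int) + 1 + 1) b (aSwapStep t (k : Int)) (by omega) (by omega)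
      have e4 : (k : Int) + 1 + 1 - 1 = (k : Int) + 1 := by ring
      rw [e4] at this
      exact this

-- A equals the recursive bubble pass.
theorem a_eq_bubble : ∀ (xs : List Int) (cur : Int), tab_Classe (cur :: xs) = bubble cur xs := by
  intro xs
  induction xs with
  | nil =>
    intro cur
    simp [tab_Classe, bubble, PySem.List.pyRange_one_eq_nil]
  | cons y rest ih =>
    intro cur
    have hlen : ((cur :: y :: rest).length : Int) - 1 = (rest.length : Int) + 1 := by
      simp only [List.length_cons]; push_cast; ring
    rw [tab_Classe, hlen, PySem.List.pyRange_one_cons (by positivity)]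
    simp only [List.foldl_cons, zero_add]
    have hpos : (0 : Int) ≤ (rest.length : Int) + 1 := by positivity
    have hstep : aSwapStep (cur :: y :: rest) 0 =
        if cur > y then y :: cur :: rest else cur :: y :: rest := by
      simp [aSwapStep, PySem.List.pyGetD, PySem.List.pyGet?, PySem.List.pyIdx?,
        PySem.List.pySetD, PySem.List.pySet?, hpos]
    rw [hstep]
    have hfs : ∀ (z : Int) (t : List Int),
        (PySem.List.pyRange 1 ((rest.length : Int) + 1) 1).foldl aSwapStep (z :: t) =
          z :: (PySem.List.pyRange 0 (rest.length : Int) 1).foldl aSwapStep t := by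
      intro z t
      have := fold_shift z rest.length 1 ((rest.length : Int) + 1) t le_rfl (by omega)
      simpa using this
    by_cases hc : cur > y
    · rw [if_pos hc, hfs y (cur :: rest)]
      have e : (rest.length : Int) = ((cur :: rest).length : Int) - 1 := by
        simp only [List.length_cons]; push_cast; ring
      rw [e, ← tab_Classe, ih cur, bubble, if_pos hc]
    · rw [if_neg hc, hfs cur (y :: rest)]
      have e : (rest.length : Int) = ((y :: rest).length : Int) - 1 := by
        simp only [List.length_cons]; push_cast; ring
      rw [e, ← tab_Classe, ih y, bubble, if_neg hc]

-- ===== VERDICT (by name: the statement is the Claim_ definition above) =====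
theorem tab_Classe_spec : Claim_equal_tab_Classe := by
  intro tab _
  unfold Spec_tab_Classe
  cases tab with
  | nil => rfl
  | cons c xs => rw [a_eq_bubble xs c, alt_eq_bubble]
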